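-- pv_equiv track=rewrite | github.com/purpledragon-ca/Bank_Statement_Analysis | general_pdf_extrract.py | merge_consecutive_text_lines
-- ===== SOURCE A (Python) =====
-- def merge_consecutive_text_lines(lines, fingerprints):
--     """
--     Merges consecutive 'TEXT' lines into a single line.
--
--     This simplifies pattern detection by ensuring merchant names that span
--     multiple lines are treated as a single 'TEXT' entity.
--
--     :param lines: The original list of text lines.
--     :param fingerprints: The original list of line fingerprints.
--     :return: A tuple of (merged_lines, merged_fingerprints).
--     """
--     if not lines:
--         return [], []
--
--     merged_lines = []
--     merged_fingerprints = []
--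
--     i = 0
--     while i < len(lines):
--         current_fp = fingerprints[i]
--
--         # If the line is NOT a text line, just append it and move on.
--         if current_fp != 'TEXT':
--             merged_lines.append(lines[i])
--             merged_fingerprints.append(fingerprints[i])
--             i += 1
--         else:
--             # It's a 'TEXT' line. Look ahead to see if the next ones are also 'TEXT'.
--             text_block = [lines[i]]
--             j = i + 1
--             while j < len(fingerprints) and fingerprints[j] == 'TEXT':
--                 text_block.append(lines[j])
--                 j += 1
--
--             # Join the collected text lines into a single string.
--             combined_text = ' '.join(text_block)
--             merged_lines.append(combined_text)
--
--             # Create a new fingerprint for the combined text line.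
--             # We use the combined length as the feature.
--             merged_fingerprints.append('TEXT')
--
--             # Move the main index past all the text lines we just merged.
--             i = j
--
--     return merged_lines, merged_fingerprints
-- ===== SOURCE B (Python) =====
-- def merge_consecutive_text_lines(lines, fingerprints):
--     """Single forward pass: a TEXT line is folded into the previous output
--     entry when that entry is itself TEXT, otherwise appended."""
--     out_lines = []
--     out_fps = []
--     for ln, fp in zip(lines, fingerprints):
--         if fp == 'TEXT' and out_fps and out_fps[-1] == 'TEXT':
--             out_lines[-1] = out_lines[-1] + ' ' + ln
--         else:
--             out_lines.append(ln)
--             out_fps.append(fp)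
--     return out_lines, out_fps
-- ===== Notes on version B (the rewrite author's own statement) =====
-- stated objective: simpler
-- what changed: A's two-index while loop with an inner look-ahead scan that collects a whole TEXT run before joining is replaced by a single forward pass over zip(lines, fingerprints) that folds each TEXT line into the previous output entry when that entry is TEXT.
import Mathlib
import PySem

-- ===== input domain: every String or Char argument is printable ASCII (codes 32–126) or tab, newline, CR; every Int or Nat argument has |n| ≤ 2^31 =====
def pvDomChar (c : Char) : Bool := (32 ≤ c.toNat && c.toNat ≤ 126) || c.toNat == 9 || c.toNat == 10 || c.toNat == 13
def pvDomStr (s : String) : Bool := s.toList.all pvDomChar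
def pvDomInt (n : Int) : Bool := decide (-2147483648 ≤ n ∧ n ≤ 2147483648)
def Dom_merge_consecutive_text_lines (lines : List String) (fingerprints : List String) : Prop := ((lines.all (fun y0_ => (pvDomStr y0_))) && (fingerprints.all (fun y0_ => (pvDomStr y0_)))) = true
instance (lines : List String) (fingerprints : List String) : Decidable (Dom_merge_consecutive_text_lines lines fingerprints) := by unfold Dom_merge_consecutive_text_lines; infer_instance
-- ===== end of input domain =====

-- B replaces A's two-index while loop (inner look-ahead collecting a whole TEXT run, then join)
-- by a single forward pass over zip(lines, fingerprints) that folds each TEXT line into the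
-- previous output entry when that entry is TEXT (objective: simpler).


-- ===== PORT A =====
-- inner 'while j < len(fingerprints) and fingerprints[j] == "TEXT"' look-ahead loop;
-- the list accesses use getD "": inside Pre_ (equal lengths) every index taken is in range,
-- exactly where Python indexing returns (out of range = IndexError is excluded by Pre_).
def mctlInner (lines fingerprints : List String) (j : Nat) (text_block : List String) : List String × Nat :=
  if _h : j < fingerprints.length ∧ fingerprints.getD j "" = "TEXT" then
    mctlInner lines fingerprints (j + 1) (text_block ++ [lines.getD j ""])
  else (text_block, j)
termination_by fingerprints.length - j
decreasing_by omega

-- the port's outer loop needs this to terminate: the inner loop never moves j backwards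
theorem mctlInner_le (lines fingerprints : List String) (j : Nat) (tb : List String) :
    j ≤ (mctlInner lines fingerprints j tb).2 := by
  fun_induction mctlInner with
  | case1 j tb h ih => omega
  | case2 j tb h => simp

-- outer 'while i < len(lines)' loop of A
def mctlLoop (lines fingerprints : List String) (i : Nat) (ml mf : List String) : List String × List String :=
  if _hi : i < lines.length then
    let fp := fingerprints.getD i ""
    if fp ≠ "TEXT" then
      mctlLoop lines fingerprints (i + 1) (ml ++ [lines.getD i ""]) (mf ++ [fp])
    else
      let r := mctlInner lines fingerprints (i + 1) [lines.getD i ""]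
      mctlLoop lines fingerprints r.2 (ml ++ [PySem.Str.join " " r.1]) (mf ++ ["TEXT"])
  else (ml, mf)
termination_by lines.length - i
decreasing_by
  · omega
  · have := mctlInner_le lines fingerprints (i + 1) [lines.getD i ""]
    omega

def merge_consecutive_text_lines (lines : List String) (fingerprints : List String) : List String × List String :=
  if lines = [] then ([], [])
  else mctlLoop lines fingerprints 0 [] []

-- ===== PORT B =====
def merge_consecutive_text_lines_alt (lines : List String) (fingerprints : List String) : List String × List String :=
  (lines.zip fingerprints).foldl
    (fun st p =>
      if p.2 = "TEXT" ∧ st.2.getLast? = some "TEXT" then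
        (st.1.dropLast ++ [(st.1.getLast?.getD "") ++ " " ++ p.1], st.2)
      else (st.1 ++ [p.1], st.2 ++ [p.2]))
    ([], [])

-- ===== PRECONDITION & SPEC =====
-- Pre_ is exactly the set of inputs on which A returns: outside it A raises IndexError — either
-- fingerprints is shorter than a non-empty lines (fingerprints[i] out of range), or a TEXT run
-- crosses the end of lines into a longer fingerprints list (the inner scan reads lines[j] out of range).
def Pre_merge_consecutive_text_lines (lines : List String) (fingerprints : List String) : Prop :=
  (lines.length ≤ fingerprints.length ∨ lines = []) ∧
  ¬(lines ≠ [] ∧ lines.length < fingerprints.length ∧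
    fingerprints.getD lines.length "" = "TEXT" ∧ fingerprints.getD (lines.length - 1) "" = "TEXT")
instance (lines : List String) (fingerprints : List String) : Decidable (Pre_merge_consecutive_text_lines lines fingerprints) := by unfold Pre_merge_consecutive_text_lines; infer_instance

def pvWitness_merge_consecutive_text_lines : List String × List String :=
  (["a", "b", "x", "c"], ["TEXT", "TEXT", "NUM", "TEXT"])

def Spec_merge_consecutive_text_lines (lines : List String) (fingerprints : List String) (out : List String × List String) : Prop := out = merge_consecutive_text_lines_alt lines fingerprints
instance (lines : List String) (fingerprints : List String) (out : List String × List String) : Decidable (Spec_merge_consecutive_text_lines lines fingerprints out) := by unfold Spec_merge_consecutive_text_lines; infer_instance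

-- ===== CLAIM (what is proved, stated in full; the proofs are below) =====
def Claim_equal_merge_consecutive_text_lines : Prop := ∀ (lines : List String) (fingerprints : List String), Dom_merge_consecutive_text_lines lines fingerprints → Pre_merge_consecutive_text_lines lines fingerprints → Spec_merge_consecutive_text_lines lines fingerprints (merge_consecutive_text_lines lines fingerprints)

-- ===== LEMMAS AND PROOFS =====

-- canonical run-splitting form both ports are reduced to
def pvJoinRun (l : String) (blk : List String) : String :=
  blk.foldl (fun a b => a ++ " " ++ b) l

def pvCanon : List (String × String) → List String × List String
  | [] => ([], [])
  | p :: rest =>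
    if p.2 = "TEXT" then
      let r := pvCanon (rest.dropWhile (fun q => q.2 = "TEXT"))
      (pvJoinRun p.1 ((rest.takeWhile (fun q => q.2 = "TEXT")).map Prod.fst) :: r.1, "TEXT" :: r.2)
    else
      let r := pvCanon rest
      (p.1 :: r.1, p.2 :: r.2)
termination_by ps => ps.length
decreasing_by
  · have := List.length_dropWhile_le (p := fun q : String × String => q.2 = "TEXT") (l := rest)
    simp only [List.length_cons]; omega
  · simp

theorem pv_dropWhile_eq_drop {α} (p : α → Bool) (xs : List α) :
    xs.dropWhile p = xs.drop (xs.takeWhile p).length := by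
  induction xs with
  | nil => rfl
  | cons x t ih => by_cases h : p x <;> simp [List.dropWhile, List.takeWhile, h, ih]

theorem pvJoin_eq_joinRun (l : String) (blk : List String) :
    PySem.Str.join " " (l :: blk) = pvJoinRun l blk := by
  induction blk generalizing l with
  | nil =>
    apply String.toList_inj.mp
    simp [PySem.Str.toList_join, PySem.Chars.join_singleton, pvJoinRun]
  | cons b t ih =>
    have step : PySem.Str.join " " (l :: b :: t) = PySem.Str.join " " ((l ++ " " ++ b) :: t) := by
      apply String.toList_inj.mp
      cases t with
      | nil =>
        simp [PySem.Str.toList_join, PySem.Chars.join_singleton,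
              PySem.Chars.join_cons_cons, String.toList_append]
      | cons c t' =>
        simp [PySem.Str.toList_join, PySem.Chars.join_cons_cons, String.toList_append]
    rw [step, ih]
    simp [pvJoinRun]

-- A's inner loop collects exactly the TEXT-run of the zipped tail
theorem mctlInner_eq (lines fingerprints : List String)
    (hlen : lines.length = fingerprints.length) (j : Nat) (tb : List String) :
    mctlInner lines fingerprints j tb =
      (tb ++ (((lines.zip fingerprints).drop j).takeWhile (fun q => q.2 = "TEXT")).map Prod.fst,
       j + (((lines.zip fingerprints).drop j).takeWhile (fun q => q.2 = "TEXT")).length) := by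
  fun_induction mctlInner with
  | case1 j tb h ih =>
    have hj : j < (lines.zip fingerprints).length := by simp [List.length_zip]; omega
    have hdrop : (lines.zip fingerprints).drop j =
        (lines.zip fingerprints)[j] :: (lines.zip fingerprints).drop (j + 1) :=
      List.drop_eq_getElem_cons hj
    have hget : (lines.zip fingerprints)[j] = (lines[j]'(by omega), fingerprints[j]'(by omega)) :=
      List.getElem_zip ..
    have hfp : fingerprints.getD j "" = fingerprints[j]'(by omega) := List.getD_eq_getElem ..
    have hln : lines.getD j "" = lines[j]'(by omega) := List.getD_eq_getElem ..
    rw [ih, hdrop]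
    simp only [hget, List.takeWhile]
    rw [hfp.symm]
    simp only [h.2, decide_true, List.map_cons, List.length_cons, Prod.mk.injEq]
    refine ⟨by rw [hln]; simp, by omega⟩
  | case2 j tb h =>
    have hempty : ((lines.zip fingerprints).drop j).takeWhile (fun q => q.2 = "TEXT") = [] := by
      by_cases hj : j < fingerprints.length
      · have hj' : j < (lines.zip fingerprints).length := by simp [List.length_zip]; omega
        rw [List.drop_eq_getElem_cons hj', List.getElem_zip]
        have hfp : fingerprints.getD j "" = fingerprints[j]'(by omega) := List.getD_eq_getElem ..
        have : ¬ fingerprints[j]'(by omega) = "TEXT" := by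
          rw [← hfp]; intro hc; exact h ⟨hj, hc⟩
        simp [List.takeWhile, this]
      · have : (lines.zip fingerprints).drop j = [] := by
          apply List.drop_eq_nil_of_le; simp [List.length_zip]; omega
        simp [this]
    simp [hempty]

-- A's outer loop computes the canonical form of the zipped tail
theorem mctlLoop_eq (lines fingerprints : List String)
    (hlen : lines.length = fingerprints.length) (i : Nat) (ml mf : List String) :
    mctlLoop lines fingerprints i ml mf =
      (ml ++ (pvCanon ((lines.zip fingerprints).drop i)).1,
       mf ++ (pvCanon ((lines.zip fingerprints).drop i)).2) := by
  fun_induction mctlLoop with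
  | case1 i ml mf hi fp hfp ih =>
    -- non-TEXT line
    have hi' : i < (lines.zip fingerprints).length := by simp [List.length_zip]; omega
    have hdrop : (lines.zip fingerprints).drop i =
        (lines.zip fingerprints)[i] :: (lines.zip fingerprints).drop (i + 1) :=
      List.drop_eq_getElem_cons hi'
    have hget : (lines.zip fingerprints)[i] = (lines[i]'(by omega), fingerprints[i]'(by omega)) :=
      List.getElem_zip ..
    have hfpv : fingerprints.getD i "" = fingerprints[i]'(by omega) := List.getD_eq_getElem ..
    have hlnv : lines.getD i "" = lines[i]'(by omega) := List.getD_eq_getElem ..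
    rw [ih, hdrop]
    simp only [hget]
    rw [pvCanon]
    have hne : ¬ fingerprints[i]'(by omega) = "TEXT" := by rw [← hfpv]; exact hfp
    simp only [List.getD] at hlnv hfpv
    simp [hne, hlnv, hfpv, fp]
  | case2 i ml mf hi fp hfp r ih =>
    -- TEXT line: expand the inner loop
    have hi' : i < (lines.zip fingerprints).length := by simp [List.length_zip]; omega
    have hdrop : (lines.zip fingerprints).drop i =
        (lines.zip fingerprints)[i] :: (lines.zip fingerprints).drop (i + 1) :=
      List.drop_eq_getElem_cons hi'
    have hget : (lines.zip fingerprints)[i] = (lines[i]'(by omega), fingerprints[i]'(by omega)) :=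
      List.getElem_zip ..
    have hfpv : fingerprints.getD i "" = fingerprints[i]'(by omega) := List.getD_eq_getElem ..
    have hlnv : lines.getD i "" = lines[i]'(by omega) := List.getD_eq_getElem ..
    have hfpT : fingerprints[i]'(by omega) = "TEXT" := by
      rw [← hfpv]; simpa [fp] using hfp
    have hr : r =
        ([lines.getD i ""] ++ (((lines.zip fingerprints).drop (i + 1)).takeWhile (fun q => q.2 = "TEXT")).map Prod.fst,
         (i + 1) + (((lines.zip fingerprints).drop (i + 1)).takeWhile (fun q => q.2 = "TEXT")).length) := by
      simpa [r] using mctlInner_eq lines fingerprints hlen (i + 1) [lines.getD i ""]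
    rw [ih, hdrop]
    simp only [hget]
    rw [pvCanon]
    simp only [hfpT, if_pos]
    have hdw : ((lines.zip fingerprints).drop (i + 1)).dropWhile (fun q => q.2 = "TEXT") =
        (lines.zip fingerprints).drop r.2 := by
      rw [pv_dropWhile_eq_drop, List.drop_drop, hr]
    rw [← hdw]
    have hjoin : PySem.Str.join " " r.1 =
        pvJoinRun (lines[i]'(by omega))
          ((((lines.zip fingerprints).drop (i + 1)).takeWhile (fun q => q.2 = "TEXT")).map Prod.fst) := by
      rw [hr]
      simp only [List.singleton_append]
      rw [hlnv, pvJoin_eq_joinRun]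
    simp [hjoin]
  | case3 i ml mf hi =>
    have : (lines.zip fingerprints).drop i = [] := by
      apply List.drop_eq_nil_of_le; simp [List.length_zip]; omega
    simp [this, pvCanon]

-- zip already truncates to the shorter list
theorem pv_zip_take (l f : List String) : l.zip (f.take l.length) = l.zip f := by
  induction l generalizing f with
  | nil => simp
  | cons x t ih =>
    cases f with
    | nil => simp
    | cons y g => simpa using ih g

-- under Pre_, A's inner loop never looks past lines.length, so truncating fingerprints there
-- does not change it (invariant: the run entered through a TEXT fingerprint at j - 1)
theorem mctlInner_take (lines fingerprints : List String)
    (hle : lines.length ≤ fingerprints.length)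
    (hstop : ¬(lines.length < fingerprints.length ∧
      fingerprints.getD lines.length "" = "TEXT" ∧
      fingerprints.getD (lines.length - 1) "" = "TEXT")) :
    ∀ (n j : Nat) (tb : List String), lines.length - j ≤ n → 1 ≤ j → j ≤ lines.length →
      fingerprints.getD (j - 1) "" = "TEXT" →
      mctlInner lines fingerprints j tb = mctlInner lines (fingerprints.take lines.length) j tb := by
  intro n
  induction n with
  | zero =>
    intro j tb hn h1 hL hprev
    have hj : j = lines.length := by omega
    have hcL : ¬(j < fingerprints.length ∧ fingerprints.getD j "" = "TEXT") := by
      rintro ⟨hjf, hT⟩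
      exact hstop ⟨by omega, by rw [← hj]; exact hT, by rw [← hj]; exact hprev⟩
    have hcR : ¬(j < (fingerprints.take lines.length).length ∧
        (fingerprints.take lines.length).getD j "" = "TEXT") := by
      rintro ⟨hlt, -⟩
      simp only [List.length_take] at hlt
      omega
    conv_lhs => rw [mctlInner]
    conv_rhs => rw [mctlInner]
    rw [dif_neg hcL, dif_neg hcR]
  | succ m ih =>
    intro j tb hn h1 hL hprev
    by_cases hj : j = lines.length
    · have hcL : ¬(j < fingerprints.length ∧ fingerprints.getD j "" = "TEXT") := by
        rintro ⟨hjf, hT⟩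
        exact hstop ⟨by omega, by rw [← hj]; exact hT, by rw [← hj]; exact hprev⟩
      have hcR : ¬(j < (fingerprints.take lines.length).length ∧
          (fingerprints.take lines.length).getD j "" = "TEXT") := by
        rintro ⟨hlt, -⟩
        simp only [List.length_take] at hlt
        omega
      conv_lhs => rw [mctlInner]
      conv_rhs => rw [mctlInner]
      rw [dif_neg hcL, dif_neg hcR]
    · have hjL : j < lines.length := by omega
      have hget : (fingerprints.take lines.length).getD j "" = fingerprints.getD j "" := by
        rw [List.getD_eq_getElem _ _ (by simp only [List.length_take]; omega),
            List.getD_eq_getElem _ _ (by omega)]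
        simp
      by_cases hT : fingerprints.getD j "" = "TEXT"
      · conv_lhs => rw [mctlInner]
        conv_rhs => rw [mctlInner]
        rw [dif_pos ⟨by omega, hT⟩,
            dif_pos ⟨by simp only [List.length_take]; omega, by rw [hget]; exact hT⟩]
        exact ih (j + 1) (tb ++ [lines.getD j ""]) (by omega) (by omega) (by omega)
          (by simpa using hT)
      · conv_lhs => rw [mctlInner]
        conv_rhs => rw [mctlInner]
        rw [dif_neg (by rintro ⟨-, h2⟩; exact hT h2),
            dif_neg (by rintro ⟨-, h2⟩; rw [hget] at h2; exact hT h2)]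

-- consequently the outer loop is unchanged by the truncation as well
theorem mctlLoop_take (lines fingerprints : List String)
    (hle : lines.length ≤ fingerprints.length)
    (hstop : ¬(lines.length < fingerprints.length ∧
      fingerprints.getD lines.length "" = "TEXT" ∧
      fingerprints.getD (lines.length - 1) "" = "TEXT")) :
    ∀ (n i : Nat) (ml mf : List String), lines.length - i ≤ n →
      mctlLoop lines fingerprints i ml mf = mctlLoop lines (fingerprints.take lines.length) i ml mf := by
  intro n
  induction n with
  | zero =>
    intro i ml mf hn
    conv_lhs => rw [mctlLoop]
    conv_rhs => rw [mctlLoop]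
    rw [dif_neg (by omega), dif_neg (by omega)]
  | succ m ih =>
    intro i ml mf hn
    by_cases hi : i < lines.length
    · have hget : (fingerprints.take lines.length).getD i "" = fingerprints.getD i "" := by
        rw [List.getD_eq_getElem _ _ (by simp only [List.length_take]; omega),
            List.getD_eq_getElem _ _ (by omega)]
        simp
      conv_lhs => rw [mctlLoop]
      conv_rhs => rw [mctlLoop]
      rw [dif_pos hi, dif_pos hi]
      simp only [hget]
      by_cases hT : fingerprints.getD i "" = "TEXT"
      · rw [if_neg (by simpa using hT), if_neg (by simpa using hT)]
        have hinner := mctlInner_take lines fingerprints hle hstop (lines.length - (i + 1))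
          (i + 1) [lines.getD i ""] (by omega) (by omega) (by omega) (by simpa using hT)
        rw [← hinner]
        have hr := mctlInner_le lines fingerprints (i + 1) [lines.getD i ""]
        exact ih _ _ _ (by omega)
      · rw [if_pos (by simpa using hT), if_pos (by simpa using hT)]
        exact ih _ _ _ (by omega)
    · conv_lhs => rw [mctlLoop]
      conv_rhs => rw [mctlLoop]
      rw [dif_neg hi, dif_neg hi]

theorem portA_eq_canon (lines fingerprints : List String)
    (hpre : Pre_merge_consecutive_text_lines lines fingerprints) :
    merge_consecutive_text_lines lines fingerprints = pvCanon (lines.zip fingerprints) := by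
  unfold merge_consecutive_text_lines
  by_cases h : lines = []
  · simp [h, pvCanon]
  · obtain ⟨hle', hstop'⟩ := hpre
    have hle : lines.length ≤ fingerprints.length := hle'.resolve_right h
    have hstop : ¬(lines.length < fingerprints.length ∧
        fingerprints.getD lines.length "" = "TEXT" ∧
        fingerprints.getD (lines.length - 1) "" = "TEXT") := by
      rintro ⟨h1, h2, h3⟩; exact hstop' ⟨h, h1, h2, h3⟩
    rw [if_neg h,
        mctlLoop_take lines fingerprints hle hstop lines.length 0 [] [] (by omega),
        mctlLoop_eq lines (fingerprints.take lines.length)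
          (by simp [List.length_take, Nat.min_eq_left hle]) 0 [] []]
    simp [pv_zip_take]

-- B's fold step
def pvStep (st : List String × List String) (p : String × String) : List String × List String :=
  if p.2 = "TEXT" ∧ st.2.getLast? = some "TEXT" then
    (st.1.dropLast ++ [(st.1.getLast?.getD "") ++ " " ++ p.1], st.2)
  else (st.1 ++ [p.1], st.2 ++ [p.2])

-- joint invariant for B's fold: outside a TEXT run it appends the canonical form; inside a TEXT
-- run it accumulates the run into the last entry and then continues canonically
theorem pvFoldB (n : Nat) : ∀ (ps : List (String × String)), ps.length ≤ n →
    (∀ ml mf : List String, mf.getLast? ≠ some "TEXT" →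
       ps.foldl pvStep (ml, mf) = (ml ++ (pvCanon ps).1, mf ++ (pvCanon ps).2)) ∧
    (∀ (ml mf : List String) (cur : String),
       ps.foldl pvStep (ml ++ [cur], mf ++ ["TEXT"]) =
         ((ml ++ [pvJoinRun cur ((ps.takeWhile (fun q => q.2 = "TEXT")).map Prod.fst)]) ++
            (pvCanon (ps.dropWhile (fun q => q.2 = "TEXT"))).1,
          (mf ++ ["TEXT"]) ++ (pvCanon (ps.dropWhile (fun q => q.2 = "TEXT"))).2)) := by
  induction n with
  | zero =>
    intro ps hps
    have : ps = [] := List.eq_nil_of_length_eq_zero (by omega)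
    subst this
    constructor
    · intro ml mf _; simp [pvCanon]
    · intro ml mf cur; simp [pvCanon, pvJoinRun]
  | succ m ih =>
    intro ps hps
    cases ps with
    | nil =>
      constructor
      · intro ml mf _; simp [pvCanon]
      · intro ml mf cur; simp [pvCanon, pvJoinRun]
    | cons p rest =>
      have hrest : rest.length ≤ m := by simp at hps; omega
      constructor
      · intro ml mf hmf
        simp only [List.foldl_cons]
        by_cases hp : p.2 = "TEXT"
        · have hstep : pvStep (ml, mf) p = (ml ++ [p.1], mf ++ [p.2]) := by
            unfold pvStep
            rw [if_neg]; rintro ⟨-, h2⟩; exact hmf h2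
          rw [hstep, hp]
          have := (ih rest hrest).2 ml mf p.1
          rw [this]
          rw [pvCanon]
          simp [hp]
        · have hstep : pvStep (ml, mf) p = (ml ++ [p.1], mf ++ [p.2]) := by
            unfold pvStep
            rw [if_neg]; rintro ⟨h1, -⟩; exact hp h1
          rw [hstep]
          have hlast : (mf ++ [p.2]).getLast? ≠ some "TEXT" := by
            rw [List.getLast?_concat]
            intro hc
            exact hp (Option.some_injective _ hc)
          rw [(ih rest hrest).1 (ml ++ [p.1]) (mf ++ [p.2]) hlast]
          rw [pvCanon]
          simp [hp]
      · intro ml mf cur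
        simp only [List.foldl_cons]
        by_cases hp : p.2 = "TEXT"
        · have hstep : pvStep (ml ++ [cur], mf ++ ["TEXT"]) p =
              (ml ++ [cur ++ " " ++ p.1], mf ++ ["TEXT"]) := by
            unfold pvStep
            rw [if_pos ⟨hp, by rw [List.getLast?_concat]⟩]
            simp
          rw [hstep]
          have := (ih rest hrest).2 ml mf (cur ++ " " ++ p.1)
          rw [this]
          have htw : (p :: rest).takeWhile (fun q => q.2 = "TEXT") =
              p :: rest.takeWhile (fun q => q.2 = "TEXT") := by
            simp [List.takeWhile, hp]
          have hdw : (p :: rest).dropWhile (fun q => q.2 = "TEXT") =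
              rest.dropWhile (fun q => q.2 = "TEXT") := by
            simp [List.dropWhile, hp]
          rw [htw, hdw]
          simp [pvJoinRun]
        · have hstep : pvStep (ml ++ [cur], mf ++ ["TEXT"]) p =
              ((ml ++ [cur]) ++ [p.1], (mf ++ ["TEXT"]) ++ [p.2]) := by
            unfold pvStep
            rw [if_neg]; rintro ⟨h1, -⟩; exact hp h1
          rw [hstep]
          have hlast : ((mf ++ ["TEXT"]) ++ [p.2]).getLast? ≠ some "TEXT" := by
            rw [List.getLast?_concat]
            intro hc
            exact hp (Option.some_injective _ hc)
          rw [(ih rest hrest).1 ((ml ++ [cur]) ++ [p.1]) ((mf ++ ["TEXT"]) ++ [p.2]) hlast]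
          have htw : (p :: rest).takeWhile (fun q => q.2 = "TEXT") = [] := by
            simp [List.takeWhile, hp]
          have hdw : (p :: rest).dropWhile (fun q => q.2 = "TEXT") = p :: rest := by
            simp [List.dropWhile, hp]
          rw [htw, hdw, pvCanon]
          simp [hp, pvJoinRun]

theorem portB_eq_canon (lines fingerprints : List String) :
    merge_consecutive_text_lines_alt lines fingerprints = pvCanon (lines.zip fingerprints) := by
  unfold merge_consecutive_text_lines_alt
  have h := (pvFoldB (lines.zip fingerprints).length (lines.zip fingerprints) le_rfl).1
      [] [] (by simp)
  simpa [pvStep] using h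

-- ===== VERDICT (by name: the statement is the Claim_ definition above) =====
theorem merge_consecutive_text_lines_spec : Claim_equal_merge_consecutive_text_lines := by
  intro lines fingerprints _ hpre
  unfold Spec_merge_consecutive_text_lines
  rw [portA_eq_canon lines fingerprints hpre, portB_eq_canon]
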